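-- pv_equiv track=rewrite | github.com/yfyourfriend/CAY-algorithm | util/image_generation.py | scale_binmat
-- ===== SOURCE A (Python) =====
-- def scale_binmat(input_mat,ktimes):
--     """
--     Assume input from a list of list matrix
--     Returns ktimes times bigger matrix.
--     """
--     lenmat = len(input_mat)
--     # define ktimes times bigger matrix
--     output_mat = [[0 for i in range(ktimes*lenmat)] for j in range(ktimes*lenmat)]
--
--     for i in range(lenmat):
--         for j in range(lenmat):
--             # where i,j correspond to row, col of mat
--             # Produce ktimes x ktimes for each entry
--             for k in range(ktimes):
--                 for l in range(ktimes):
--                     output_mat[ktimes*i+k][ktimes*j+l] = input_mat[i][j]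
--     return output_mat
-- ===== SOURCE B (Python) =====
-- def scale_binmat(input_mat, ktimes):
--     lenmat = len(input_mat)
--     output_mat = []
--     for i in range(lenmat):
--         # expand row i once: each entry repeated ktimes
--         row = [input_mat[i][j] for j in range(lenmat) for _ in range(ktimes)]
--         for _ in range(ktimes):
--             output_mat.append(list(row))
--     return output_mat
-- ===== Notes on version B (the rewrite author's own statement) =====
-- stated objective: simpler
-- what changed: Replaces A's preallocated zero matrix filled by four nested index-arithmetic loops with a two-stage build: expand each input row once (each entry repeated ktimes), then append ktimes fresh copies of that expanded row.
import Mathlib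
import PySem

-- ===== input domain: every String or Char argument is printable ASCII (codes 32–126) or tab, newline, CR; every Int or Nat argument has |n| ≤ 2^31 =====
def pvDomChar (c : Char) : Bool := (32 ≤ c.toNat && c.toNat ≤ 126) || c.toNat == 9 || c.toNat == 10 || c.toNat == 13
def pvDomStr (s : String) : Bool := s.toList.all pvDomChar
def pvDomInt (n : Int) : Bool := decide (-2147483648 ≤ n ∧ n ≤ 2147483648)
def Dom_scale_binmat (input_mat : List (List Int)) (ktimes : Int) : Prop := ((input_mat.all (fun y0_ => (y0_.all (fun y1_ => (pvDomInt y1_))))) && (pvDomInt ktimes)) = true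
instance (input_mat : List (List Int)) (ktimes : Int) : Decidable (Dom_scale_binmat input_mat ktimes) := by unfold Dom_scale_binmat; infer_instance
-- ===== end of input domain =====

-- B replaces A's preallocated zero matrix filled by four nested index-arithmetic loops with a
-- two-stage build (expand each row once, then append ktimes copies of it); objective: simpler.

-- ===== PORT A =====
def scale_binmat (input_mat : List (List Int)) (ktimes : Int) : List (List Int) :=
  let lenmat : Int := input_mat.length
  let output_mat : List (List Int) :=
    (PySem.List.pyRange 0 (ktimes * lenmat) 1).map (fun _ =>
      (PySem.List.pyRange 0 (ktimes * lenmat) 1).map (fun _ => (0 : Int)))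
  (PySem.List.pyRange 0 lenmat 1).foldl (fun om i =>
    (PySem.List.pyRange 0 lenmat 1).foldl (fun om j =>
      (PySem.List.pyRange 0 ktimes 1).foldl (fun om k =>
        (PySem.List.pyRange 0 ktimes 1).foldl (fun om l =>
          PySem.List.pySetD om (ktimes * i + k)
            (PySem.List.pySetD (PySem.List.pyGetD om (ktimes * i + k) [])
              (ktimes * j + l)
              (PySem.List.pyGetD (PySem.List.pyGetD input_mat i []) j 0)))
          om) om) om) output_mat

-- ===== PORT B =====
def scale_binmat_alt (input_mat : List (List Int)) (ktimes : Int) : List (List Int) :=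
  let lenmat : Int := input_mat.length
  (PySem.List.pyRange 0 lenmat 1).foldl (fun out i =>
    let row : List Int :=
      (PySem.List.pyRange 0 lenmat 1).flatMap (fun j =>
        (PySem.List.pyRange 0 ktimes 1).map (fun _ =>
          PySem.List.pyGetD (PySem.List.pyGetD input_mat i []) j 0))
    (PySem.List.pyRange 0 ktimes 1).foldl (fun out _ => out ++ [row]) out) []

-- ===== PRECONDITION & SPEC =====
-- Pre_ excludes exactly the inputs where Python A raises IndexError: ktimes > 0 with some row
-- shorter than the row count (input_mat[i][j] runs j over range(len(input_mat))).  B raises there too.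
def Pre_scale_binmat (input_mat : List (List Int)) (ktimes : Int) : Prop :=
  ktimes ≤ 0 ∨ ∀ row ∈ input_mat, input_mat.length ≤ row.length
instance (input_mat : List (List Int)) (ktimes : Int) : Decidable (Pre_scale_binmat input_mat ktimes) := by
  unfold Pre_scale_binmat; infer_instance
def pvWitness_scale_binmat : List (List Int) × Int := ([[1, 2], [3, 4]], 2)
def Spec_scale_binmat (input_mat : List (List Int)) (ktimes : Int) (out : List (List Int)) : Prop := out = scale_binmat_alt input_mat ktimes
instance (input_mat : List (List Int)) (ktimes : Int) (out : List (List Int)) : Decidable (Spec_scale_binmat input_mat ktimes out) := by unfold Spec_scale_binmat; infer_instance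

-- ===== CLAIM (what is proved, stated in full; the proofs are below) =====
def Claim_equal_scale_binmat : Prop := ∀ (input_mat : List (List Int)) (ktimes : Int), Dom_scale_binmat input_mat ktimes → Pre_scale_binmat input_mat ktimes → Spec_scale_binmat input_mat ktimes (scale_binmat input_mat ktimes)

-- ===== LEMMAS AND PROOFS =====

-- Nat-level vocabulary for the proof: entry read, single-entry write, the zero matrix,
-- A's four loops as Nat-range folds, and the common normal form (block-replicated matrix).
def pvEnt (m : List (List Int)) (p q : Nat) : Int := (m.getD p []).getD q 0
def pvSetE (om : List (List Int)) (r c : Nat) (v : Int) : List (List Int) :=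
  om.set r ((om.getD r []).set c v)
def pvZ (k n : Nat) : List (List Int) := List.replicate (k * n) (List.replicate (k * n) (0 : Int))
def pvF1 (k i kk j : Nat) (v : Int) (om : List (List Int)) (t : Nat) : List (List Int) :=
  (List.range t).foldl (fun om l => pvSetE om (k * i + kk) (k * j + l) v) om
def pvF2 (k i j : Nat) (v : Int) (om : List (List Int)) (t : Nat) : List (List Int) :=
  (List.range t).foldl (fun om kk => pvF1 k i kk j v om k) om
def pvF3 (m : List (List Int)) (k i : Nat) (om : List (List Int)) (t : Nat) : List (List Int) :=
  (List.range t).foldl (fun om j => pvF2 k i j (pvEnt m i j) om k) om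
def pvF4 (m : List (List Int)) (k n : Nat) (om : List (List Int)) (t : Nat) : List (List Int) :=
  (List.range t).foldl (fun om i => pvF3 m k i om n) om
def pvRow (m : List (List Int)) (k n i : Nat) : List Int :=
  (List.range n).flatMap (fun j => List.replicate k (pvEnt m i j))
def pvT (m : List (List Int)) (k n : Nat) : List (List Int) :=
  (List.range n).flatMap (fun i => List.replicate k (pvRow m k n i))
-- shape invariant: square matrix of side k*n
def pvP (k n : Nat) (om : List (List Int)) : Prop :=
  om.length = k * n ∧ ∀ p < k * n, (om.getD p []).length = k * n

theorem pv_getElem?_eq {α : Type} (l : List α) (p : Nat) (d : α) (h : p < l.length) :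
    l[p]? = some (l.getD p d) := by
  simp [List.getD_eq_getElem?_getD, List.getElem?_eq_getElem h]

theorem pv_div_block (k t q : Nat) (h1 : k * t ≤ q) (h2 : q < k * t + k) : q / k = t := by
  have e : k * t = t * k := Nat.mul_comm k t
  exact Nat.div_eq_of_lt_le (by omega) (by rw [Nat.succ_mul]; omega)

theorem pv_flat_singleton {α β : Type} (l : List α) (a : β) :
    l.flatMap (fun _ => [a]) = List.replicate l.length a := by
  induction l with
  | nil => rfl
  | cons x xs ih => simp [List.flatMap_cons, ih, List.replicate_succ]

theorem pv_flatRep_length {α : Type} (g : Nat → α) (k n : Nat) :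
    ((List.range n).flatMap (fun i => List.replicate k (g i))).length = k * n := by
  induction n with
  | zero => simp
  | succ n ih =>
    rw [List.range_succ, List.flatMap_append]
    simp [ih, Nat.mul_succ]

theorem pv_flatRep_get {α : Type} (g : Nat → α) (k n p : Nat) (hp : p < k * n) :
    ((List.range n).flatMap (fun i => List.replicate k (g i)))[p]? = some (g (p / k)) := by
  induction n with
  | zero => omega
  | succ n ih =>
    rw [List.range_succ, List.flatMap_append]
    by_cases h : p < k * n
    · rw [List.getElem?_append_left (by rw [pv_flatRep_length]; exact h)]
      exact ih h
    · have hkn : k * n ≤ p := by omega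
      have hlt : p < k * n + k := by have := Nat.mul_succ k n; omega
      rw [List.getElem?_append_right (by rw [pv_flatRep_length]; exact hkn),
          pv_flatRep_length]
      rw [pv_div_block k n p hkn hlt]
      simp [(by omega : p - k * n < k)]

theorem pv_ent_setE (om : List (List Int)) (r c : Nat) (v : Int) (p q : Nat)
    (hr : r < om.length) (hc : c < (om.getD r []).length) :
    pvEnt (pvSetE om r c v) p q = if p = r ∧ q = c then v else pvEnt om p q := by
  unfold pvEnt pvSetE
  rcases eq_or_ne p r with hp | hp
  · subst hp
    have h1 : (om.set p ((om.getD p []).set c v)).getD p [] = (om.getD p []).set c v := by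
      rw [List.getD_eq_getElem?_getD, List.getElem?_set_self hr, Option.getD_some]
    rw [h1]
    rcases eq_or_ne q c with hq | hq
    · subst hq
      rw [if_pos ⟨rfl, rfl⟩, List.getD_eq_getElem?_getD, List.getElem?_set_self hc,
        Option.getD_some]
    · rw [if_neg (by tauto), List.getD_eq_getElem?_getD, List.getElem?_set_ne (Ne.symm hq),
        ← List.getD_eq_getElem?_getD]
  · have h1 : (om.set r ((om.getD r []).set c v)).getD p [] = om.getD p [] := by
      rw [List.getD_eq_getElem?_getD, List.getElem?_set_ne (Ne.symm hp),
        ← List.getD_eq_getElem?_getD]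
    rw [h1, if_neg (by tauto)]

theorem pv_P_setE (k n : Nat) (om : List (List Int)) (r c : Nat) (v : Int)
    (hP : pvP k n om) (hr : r < k * n) : pvP k n (pvSetE om r c v) := by
  obtain ⟨hlen, hrow⟩ := hP
  refine ⟨by simp [pvSetE, hlen], ?_⟩
  intro p hp
  unfold pvSetE
  rcases eq_or_ne p r with hpr | hpr
  · subst hpr
    have h1 : (om.set p ((om.getD p []).set c v)).getD p [] = (om.getD p []).set c v := by
      rw [List.getD_eq_getElem?_getD, List.getElem?_set_self (by omega : p < om.length),
        Option.getD_some]
    rw [h1, List.length_set]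
    exact hrow p hp
  · have h1 : (om.set r ((om.getD r []).set c v)).getD p [] = om.getD p [] := by
      rw [List.getD_eq_getElem?_getD, List.getElem?_set_ne (Ne.symm hpr),
        ← List.getD_eq_getElem?_getD]
    rw [h1]
    exact hrow p hp

theorem pv_blk_lt (k n i kk : Nat) (hi : i < n) (hkk : kk < k) : k * i + kk < k * n := by
  have h1 : k * (i + 1) ≤ k * n := Nat.mul_le_mul_left k hi
  have h2 : k * (i + 1) = k * i + k := Nat.mul_succ k i
  omega

theorem pvF1_ent (k n i kk j : Nat) (v : Int) (om : List (List Int))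
    (t : Nat) (hP : pvP k n om) (hi : i < n) (hj : j < n) (hkk : kk < k) (ht : t ≤ k) :
    pvP k n (pvF1 k i kk j v om t) ∧
      ∀ p q, pvEnt (pvF1 k i kk j v om t) p q =
        if p = k * i + kk ∧ k * j ≤ q ∧ q < k * j + t then v else pvEnt om p q := by
  induction t with
  | zero =>
    refine ⟨hP, ?_⟩
    intro p q
    rw [if_neg (by omega)]
    rfl
  | succ t ih =>
    obtain ⟨ihP, ihE⟩ := ih (by omega)
    have hstep : pvF1 k i kk j v om (t + 1) = pvSetE (pvF1 k i kk j v om t) (k * i + kk) (k * j + t) v := by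
      unfold pvF1
      rw [List.range_succ, List.foldl_append, List.foldl_cons, List.foldl_nil]
    have hr : k * i + kk < k * n := pv_blk_lt k n i kk hi hkk
    have hc : k * j + t < k * n := pv_blk_lt k n j t hj (by omega)
    have hr' : k * i + kk < (pvF1 k i kk j v om t).length := by rw [ihP.1]; exact hr
    have hc' : k * j + t < ((pvF1 k i kk j v om t).getD (k * i + kk) []).length := by
      rw [ihP.2 _ hr]; exact hc
    constructor
    · rw [hstep]; exact pv_P_setE k n _ _ _ v ihP hr
    · intro p q
      rw [hstep, pv_ent_setE _ _ _ _ _ _ hr' hc', ihE]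
      split_ifs <;> first | rfl | omega

theorem pvF2_ent (k n i j : Nat) (v : Int) (om : List (List Int))
    (t : Nat) (hP : pvP k n om) (hi : i < n) (hj : j < n) (ht : t ≤ k) :
    pvP k n (pvF2 k i j v om t) ∧
      ∀ p q, pvEnt (pvF2 k i j v om t) p q =
        if (k * i ≤ p ∧ p < k * i + t) ∧ (k * j ≤ q ∧ q < k * j + k) then v
        else pvEnt om p q := by
  induction t with
  | zero =>
    refine ⟨hP, ?_⟩
    intro p q
    rw [if_neg (by omega)]
    rfl
  | succ t ih =>
    obtain ⟨ihP, ihE⟩ := ih (by omega)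
    have hstep : pvF2 k i j v om (t + 1) = pvF1 k i t j v (pvF2 k i j v om t) k := by
      unfold pvF2
      rw [List.range_succ, List.foldl_append, List.foldl_cons, List.foldl_nil]
    obtain ⟨sP, sE⟩ := pvF1_ent k n i t j v (pvF2 k i j v om t) k ihP hi hj (by omega) le_rfl
    constructor
    · rw [hstep]; exact sP
    · intro p q
      rw [hstep, sE, ihE]
      split_ifs <;> first | rfl | omega

theorem pvF3_ent (m : List (List Int)) (k n i : Nat) (om : List (List Int))
    (t : Nat) (hP : pvP k n om) (hi : i < n) (ht : t ≤ n) :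
    pvP k n (pvF3 m k i om t) ∧
      ∀ p q, pvEnt (pvF3 m k i om t) p q =
        if (k * i ≤ p ∧ p < k * i + k) ∧ q < k * t then pvEnt m i (q / k)
        else pvEnt om p q := by
  induction t with
  | zero =>
    refine ⟨hP, ?_⟩
    intro p q
    rw [if_neg (by omega)]
    rfl
  | succ t ih =>
    obtain ⟨ihP, ihE⟩ := ih (by omega)
    have hstep : pvF3 m k i om (t + 1) = pvF2 k i t (pvEnt m i t) (pvF3 m k i om t) k := by
      unfold pvF3
      rw [List.range_succ, List.foldl_append, List.foldl_cons, List.foldl_nil]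
    obtain ⟨sP, sE⟩ := pvF2_ent k n i t (pvEnt m i t) (pvF3 m k i om t) k ihP hi (by omega) le_rfl
    constructor
    · rw [hstep]; exact sP
    · intro p q
      rw [hstep, sE, ihE]
      have hms : k * (t + 1) = k * t + k := Nat.mul_succ k t
      split_ifs with h1 h2 h2 <;>
        first
          | rfl
          | omega
          | rw [pv_div_block k t q (by omega) (by omega)]

theorem pvF4_ent (m : List (List Int)) (k n : Nat) (om : List (List Int))
    (t : Nat) (hP : pvP k n om) (ht : t ≤ n) :
    pvP k n (pvF4 m k n om t) ∧
      ∀ p q, pvEnt (pvF4 m k n om t) p q =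
        if p < k * t ∧ q < k * n then pvEnt m (p / k) (q / k)
        else pvEnt om p q := by
  induction t with
  | zero =>
    refine ⟨hP, ?_⟩
    intro p q
    rw [if_neg (by omega)]
    rfl
  | succ t ih =>
    obtain ⟨ihP, ihE⟩ := ih (by omega)
    have hstep : pvF4 m k n om (t + 1) = pvF3 m k t (pvF4 m k n om t) n := by
      unfold pvF4
      rw [List.range_succ, List.foldl_append, List.foldl_cons, List.foldl_nil]
    obtain ⟨sP, sE⟩ := pvF3_ent m k n t (pvF4 m k n om t) n ihP (by omega) le_rfl
    constructor
    · rw [hstep]; exact sP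
    · intro p q
      rw [hstep, sE, ihE]
      have hms : k * (t + 1) = k * t + k := Nat.mul_succ k t
      split_ifs with h1 h2 h2 <;>
        first
          | rfl
          | omega
          | rw [pv_div_block k t p (by omega) (by omega)]

theorem pv_P_Z (k n : Nat) : pvP k n (pvZ k n) := by
  refine ⟨by simp [pvZ], ?_⟩
  intro p hp
  unfold pvZ
  rw [List.getD_eq_getElem?_getD, List.getElem?_replicate]
  simp [hp]

-- A's Nat-level fold equals the block-replicated normal form.
theorem pv_full (m : List (List Int)) (k n : Nat) :
    pvF4 m k n (pvZ k n) n = pvT m k n := by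
  obtain ⟨⟨hlen, hrow⟩, hE⟩ := pvF4_ent m k n (pvZ k n) n (pv_P_Z k n) le_rfl
  apply List.ext_getElem?
  intro p
  by_cases hp : p < k * n
  · rw [pv_getElem?_eq _ p [] (by rw [hlen]; exact hp)]
    unfold pvT
    rw [pv_flatRep_get _ k n p hp]
    congr 1
    apply List.ext_getElem?
    intro q
    by_cases hq : q < k * n
    · rw [pv_getElem?_eq _ q 0 (by rw [hrow p hp]; exact hq)]
      have h1 : ((pvF4 m k n (pvZ k n) n).getD p []).getD q 0 = pvEnt m (p / k) (q / k) := by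
        have := hE p q
        rw [if_pos ⟨hp, hq⟩] at this
        exact this
      rw [h1]
      unfold pvRow
      rw [pv_flatRep_get _ k n q hq]
    · have h1 : ((pvF4 m k n (pvZ k n) n).getD p []).length ≤ q := by rw [hrow p hp]; omega
      have h2 : (pvRow m k n (p / k)).length ≤ q := by unfold pvRow; rw [pv_flatRep_length]; omega
      rw [List.getElem?_eq_none h1, List.getElem?_eq_none h2]
  · have h1 : (pvF4 m k n (pvZ k n) n).length ≤ p := by rw [hlen]; omega
    have h2 : (pvT m k n).length ≤ p := by unfold pvT; rw [pv_flatRep_length]; omega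
    rw [List.getElem?_eq_none h1, List.getElem?_eq_none h2]

-- Port A at a nonnegative ktimes = ↑k is the Nat-level fold.
theorem pv_A_nat (m : List (List Int)) (k : Nat) :
    scale_binmat m (k : Int) = pvF4 m k m.length (pvZ k m.length) m.length := by
  unfold scale_binmat pvF4 pvF3 pvF2 pvF1 pvSetE pvEnt pvZ
  have hkn : (k : Int) * (m.length : Int) = ((k * m.length : Nat) : Int) := by push_cast; ring
  simp only [hkn, PySem.List.pyRange_zero_nat, List.foldl_map, List.map_map]
  simp only [Function.comp_def, ← Nat.cast_mul, ← Nat.cast_add,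
    PySem.List.pySetD_natCast, PySem.List.pyGetD_natCast]
  simp [List.map_const']

-- Port B at a nonnegative ktimes = ↑k is the block-replicated normal form.
theorem pv_B_nat (m : List (List Int)) (k : Nat) :
    scale_binmat_alt m (k : Int) = pvT m k m.length := by
  unfold scale_binmat_alt pvT pvRow pvEnt
  simp only [PySem.List.pyRange_zero_nat, List.foldl_map, List.flatMap_map, List.map_map]
  simp only [Function.comp_def, PySem.List.pyGetD_natCast]
  simp only [List.map_const', List.length_range]
  simp only [PySem.List.foldl_append_eq_flatMap, pv_flat_singleton, List.length_range,
    List.nil_append]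

theorem pv_A_nonpos (m : List (List Int)) (kt : Int) (h : kt ≤ 0) : scale_binmat m kt = [] := by
  unfold scale_binmat
  have h1 : kt * (m.length : Int) ≤ 0 :=
    mul_nonpos_of_nonpos_of_nonneg h (by positivity)
  simp [PySem.List.pyRange_one_eq_nil h1, PySem.List.pyRange_one_eq_nil h, List.foldl_fixed]

theorem pv_B_nonpos (m : List (List Int)) (kt : Int) (h : kt ≤ 0) : scale_binmat_alt m kt = [] := by
  unfold scale_binmat_alt
  simp [PySem.List.pyRange_one_eq_nil h, List.foldl_fixed]

-- ===== VERDICT (by name: the statement is the Claim_ definition above) =====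
theorem scale_binmat_spec : Claim_equal_scale_binmat := by
  intro m kt _ _
  unfold Spec_scale_binmat
  by_cases hle : kt ≤ 0
  · rw [pv_A_nonpos m kt hle, pv_B_nonpos m kt hle]
  · have hpos : 0 < kt := by omega
    obtain ⟨k, rfl⟩ : ∃ k : Nat, kt = (k : Int) :=
      ⟨kt.toNat, (Int.toNat_of_nonneg (le_of_lt hpos)).symm⟩
    rw [pv_A_nat, pv_B_nat, pv_full]
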